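-- pv_equiv track=rewrite | github.com/sicotteh/CAVA | cava/utils/core.py | trim_all_alleles
-- ===== SOURCE A (Python) =====
-- def trim_all_alleles(ref,alts): # This is a VCF-style trimming, must leave 1 base
--     ntrim = 0
--     if len(ref)==1:
--         return 0
--     for ir in range(0, len(ref)-1):
--         refbase = ref[ir]
--         for ia in range(0, len(alts)): # loop over alleles
--             if ntrim >= len(alts[ia])-1:  # Don't trim to the point of leaving empty alleles
--                 return ntrim
--             if refbase != alts[ia][ir]:
--                 return ntrim
--         ntrim = ntrim +1
--     return ntrim
-- ===== SOURCE B (Python) =====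
-- def trim_all_alleles(ref, alts):  # VCF-style trimming, must leave 1 base
--     if len(ref) <= 1:
--         return 0
--     ntrim = len(ref) - 1
--     for alt in alts:
--         cap = min(ntrim, len(alt) - 1)
--         cp = 0
--         while cp < cap and ref[cp] == alt[cp]:
--             cp += 1
--         ntrim = cp
--     return ntrim
-- ===== Notes on version B (the rewrite author's own statement) =====
-- stated objective: simpler
-- what changed: Replaces A's column-major scan with early returns from a doubly nested loop by a per-allele common-prefix length computation whose running minimum is carried allele by allele; the len(ref)==1 guard and the empty-alts case fall out of the initialization ntrim = len(ref)-1.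
import Mathlib
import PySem

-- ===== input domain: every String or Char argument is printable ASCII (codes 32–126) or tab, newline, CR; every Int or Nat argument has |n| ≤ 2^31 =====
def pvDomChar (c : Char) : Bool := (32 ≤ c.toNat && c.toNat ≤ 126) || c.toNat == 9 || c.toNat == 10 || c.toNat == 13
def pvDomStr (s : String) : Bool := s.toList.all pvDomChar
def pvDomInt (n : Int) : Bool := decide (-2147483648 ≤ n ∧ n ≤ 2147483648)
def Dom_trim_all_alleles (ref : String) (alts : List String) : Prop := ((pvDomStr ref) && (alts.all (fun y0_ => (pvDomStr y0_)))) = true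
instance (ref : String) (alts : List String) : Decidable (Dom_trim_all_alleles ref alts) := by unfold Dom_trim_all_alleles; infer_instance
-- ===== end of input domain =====

-- B replaces A's column-major scan (early return on the first failing column) by a
-- per-allele common-prefix computation with a running minimum: a simpler decomposition.

-- ===== PORT A =====
-- inner for-loop over alleles: returns some ntrim on an early `return`, none otherwise
def pvInnerA (refbase : Option Char) (ir : Nat) (ntrim : Int) : List (List Char) → Option Int
  | [] => none
  | a :: rest =>
    if ntrim ≥ (a.length : Int) - 1 then some ntrim
    else if refbase ≠ PySem.List.pyGet? a (ir : Int) then some ntrim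
    else pvInnerA refbase ir ntrim rest

-- outer for-loop: for ir in range(0, len(ref)-1)
def pvLoopA (r : List Char) (alts : List (List Char)) (stop : Nat) (ir : Nat) (ntrim : Int) : Int :=
  if _h : ir < stop then
    match pvInnerA (PySem.List.pyGet? r (ir : Int)) ir ntrim alts with
    | some v => v
    | none => pvLoopA r alts stop (ir + 1) (ntrim + 1)
  else ntrim
termination_by stop - ir

def trim_all_alleles (ref : String) (alts : List String) : Int :=
  if ref.toList.length == 1 then 0
  else pvLoopA ref.toList (alts.map String.toList) (ref.toList.length - 1) 0 0

-- ===== PORT B =====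
-- while cp < cap and ref[cp] == alt[cp]: cp += 1   (indices stay in range, pyGet? is exact here)
def pvPrefB (r a : List Char) (cap : Int) (cp : Nat) : Nat :=
  if h : (cp : Int) < cap ∧ PySem.List.pyGet? r (cp : Int) = PySem.List.pyGet? a (cp : Int) then
    pvPrefB r a cap (cp + 1)
  else cp
termination_by (cap - cp).toNat
decreasing_by omega

-- for alt in alts: ntrim = prefix length capped at min(ntrim, len(alt)-1)
def pvGoB (r : List Char) : List (List Char) → Int → Int
  | [], n => n
  | a :: rest, n =>
      let cap := min n ((a.length : Int) - 1)
      let cp := pvPrefB r a cap 0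
      pvGoB r rest (cp : Int)

def trim_all_alleles_alt (ref : String) (alts : List String) : Int :=
  if ref.toList.length ≤ 1 then 0
  else pvGoB ref.toList (alts.map String.toList) ((ref.toList.length : Int) - 1)

-- ===== PRECONDITION & SPEC =====
def Spec_trim_all_alleles (ref : String) (alts : List String) (out : Int) : Prop := out = trim_all_alleles_alt ref alts
instance (ref : String) (alts : List String) (out : Int) : Decidable (Spec_trim_all_alleles ref alts out) := by unfold Spec_trim_all_alleles; infer_instance

-- ===== CLAIM (what is proved, stated in full; the proofs are below) =====
def Claim_equal_trim_all_alleles : Prop := ∀ (ref : String) (alts : List String), Dom_trim_all_alleles ref alts → Spec_trim_all_alleles ref alts (trim_all_alleles ref alts)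

-- ===== LEMMAS AND PROOFS =====

-- "allele a fails at column k": k ≥ len a - 1 (length cap) or a mismatch with ref at k
def pvFail (r a : List Char) (k : Nat) : Bool :=
  decide ((k : Int) ≥ (a.length : Int) - 1) ||
  decide (PySem.List.pyGet? r (k : Int) ≠ PySem.List.pyGet? a (k : Int))

lemma pvFail_ex (r a : List Char) : ∃ k, pvFail r a k = true :=
  ⟨a.length, by have h : ((a.length : Int)) ≥ (a.length : Int) - 1 := by omega
                simp [pvFail, h]⟩

-- first failing column of allele a
def pvFirstFail (r a : List Char) : Nat := Nat.find (pvFail_ex r a)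

-- negation of B's while condition at cap c
def pvQ (r a : List Char) (c : Int) (k : Nat) : Bool :=
  !(decide ((k : Int) < c) && decide (PySem.List.pyGet? r (k : Int) = PySem.List.pyGet? a (k : Int)))

lemma pvQ_ex (r a : List Char) (c : Int) : ∃ k, pvQ r a c k = true :=
  ⟨c.toNat, by have h : ¬ ((c.toNat : Int) < c) := by omega
               simp only [pvQ, decide_eq_false h, Bool.false_and, Bool.not_false]⟩

lemma find_congr (p q : Nat → Bool) (hp : ∃ k, p k = true) (hq : ∃ k, q k = true)
    (h : ∀ k, p k = q k) : Nat.find hp = Nat.find hq := by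
  have hpq : p = q := funext h
  subst hpq; rfl

lemma find_min (p q : Nat → Bool) (hp : ∃ k, p k = true) (hq : ∃ k, q k = true)
    (hpq : ∃ k, (p k || q k) = true) :
    Nat.find hpq = min (Nat.find hp) (Nat.find hq) := by
  rw [Nat.find_eq_iff]
  constructor
  · rcases le_total (Nat.find hp) (Nat.find hq) with h | h
    · rw [min_eq_left h]; simp [Nat.find_spec hp]
    · rw [min_eq_right h]; simp [Nat.find_spec hq]
  · intro j hj
    have h1 := Nat.find_min hp (lt_of_lt_of_le hj (min_le_left _ _))
    have h2 := Nat.find_min hq (lt_of_lt_of_le hj (min_le_right _ _))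
    simp at h1 h2
    simp [h1, h2]

lemma pvPrefB_eq_find (r a : List Char) (c : Int) :
    ∀ cp, (∀ j < cp, pvQ r a c j = false) →
      pvPrefB r a c cp = Nat.find (pvQ_ex r a c) := by
  intro cp
  fun_induction pvPrefB r a c cp with
  | case1 cp h ih =>
      intro hb
      apply ih
      intro j hj
      rcases Nat.lt_succ_iff_lt_or_eq.mp hj with hj' | rfl
      · exact hb j hj'
      · simp [pvQ, h.1, h.2]
  | case2 cp h =>
      intro hb
      symm
      rw [Nat.find_eq_iff]
      refine ⟨?_, fun j hj => by simp [hb j hj]⟩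
      show (!(decide ((cp : Int) < c) &&
        decide (PySem.List.pyGet? r (cp : Int) = PySem.List.pyGet? a (cp : Int)))) = true
      rcases Decidable.not_and_iff_or_not.mp h with h' | h'
      · rw [decide_eq_false h', Bool.false_and, Bool.not_false]
      · rw [decide_eq_false h', Bool.and_false, Bool.not_false]

-- pvQ at cap = min n c  splits into  "k ≥ n"  or  pvQ at cap c
lemma pvQ_min (r a : List Char) (n c : Int) (k : Nat) :
    pvQ r a (min n c) k = (decide (n ≤ (k : Int)) || pvQ r a c k) := by
  by_cases h1 : (k : Int) < n <;> by_cases h2 : (k : Int) < c <;>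
    by_cases h3 : PySem.List.pyGet? r (k : Int) = PySem.List.pyGet? a (k : Int) <;>
    simp [pvQ, h1, h2, h3] <;> omega

lemma pvQ_base (r a : List Char) (k : Nat) :
    pvQ r a ((a.length : Int) - 1) k = pvFail r a k := by
  by_cases h1 : (k : Int) < (a.length : Int) - 1 <;>
    by_cases h2 : PySem.List.pyGet? r (k : Int) = PySem.List.pyGet? a (k : Int) <;>
    simp [pvQ, pvFail, h1, h2] <;> omega

lemma find_ge (n : Int) (hn : 0 ≤ n) (h : ∃ k : Nat, decide (n ≤ (k : Int)) = true) :
    Nat.find h = n.toNat := by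
  rw [Nat.find_eq_iff]
  constructor
  · simp only [decide_eq_true_eq]
    omega
  · intro j hj
    simp only [decide_eq_true_eq]
    omega

-- B's step: prefix length with cap min n (len a - 1) = min n (first failing column of a)
lemma pvPrefB_step (r a : List Char) (n : Int) (hn : 0 ≤ n) :
    (pvPrefB r a (min n ((a.length : Int) - 1)) 0 : Int) = min n (pvFirstFail r a : Int) := by
  rw [pvPrefB_eq_find r a _ 0 (by omega)]
  have hge : ∃ k : Nat, decide (n ≤ (k : Int)) = true :=
    ⟨n.toNat, by simp only [decide_eq_true_eq]; omega⟩
  have hbase : ∃ k : Nat, pvQ r a ((a.length : Int) - 1) k = true := pvQ_ex r a _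
  have hor : ∃ k : Nat, (decide (n ≤ (k : Int)) || pvQ r a ((a.length : Int) - 1) k) = true :=
    ⟨n.toNat, by rw [Bool.or_eq_true]; left; simp only [decide_eq_true_eq]; omega⟩
  rw [find_congr _ _ (pvQ_ex r a (min n ((a.length : Int) - 1))) hor (pvQ_min r a n _)]
  rw [find_min _ _ hge hbase hor]
  rw [find_ge n hn hge]
  rw [find_congr _ _ hbase (pvFail_ex r a) (pvQ_base r a)]
  unfold pvFirstFail
  push_cast
  omega

-- any allele fails at column k
def pvAnyFail (r : List Char) (alts : List (List Char)) (k : Nat) : Bool :=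
  alts.any (fun a => pvFail r a k)

def pvG (r : List Char) (alts : List (List Char)) (stop : Nat) (k : Nat) : Bool :=
  decide (stop ≤ k) || pvAnyFail r alts k

lemma pvG_ex (r : List Char) (alts : List (List Char)) (stop : Nat) :
    ∃ k, pvG r alts stop k = true := ⟨stop, by simp [pvG]⟩

-- A's inner loop returns some ntrim iff some allele fails at column ir
lemma pvInnerA_eq (r : List Char) (ir : Nat) (alts : List (List Char)) :
    pvInnerA (PySem.List.pyGet? r (ir : Int)) ir (ir : Int) alts =
      if pvAnyFail r alts ir then some (ir : Int) else none := by
  induction alts with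
  | nil => simp [pvInnerA, pvAnyFail]
  | cons a t ih =>
      show (if (ir : Int) ≥ (a.length : Int) - 1 then some (ir : Int)
            else if PySem.List.pyGet? r (ir : Int) ≠ PySem.List.pyGet? a (ir : Int)
                 then some (ir : Int)
            else pvInnerA (PySem.List.pyGet? r (ir : Int)) ir (ir : Int) t) = _
      by_cases h1 : (ir : Int) ≥ (a.length : Int) - 1
      · rw [if_pos h1]
        have hany : pvAnyFail r (a :: t) ir = true := by
          rw [pvAnyFail, List.any_cons, Bool.or_eq_true]
          left
          rw [pvFail, Bool.or_eq_true]
          left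
          exact decide_eq_true h1
        rw [if_pos hany]
      · rw [if_neg h1]
        by_cases h2 : PySem.List.pyGet? r (ir : Int) = PySem.List.pyGet? a (ir : Int)
        · rw [if_neg (fun hne => hne h2), ih]
          have hf : pvFail r a ir = false := by
            rw [pvFail, Bool.or_eq_false_iff]
            exact ⟨decide_eq_false h1, decide_eq_false (fun hne => hne h2)⟩
          have hcons : pvAnyFail r (a :: t) ir = pvAnyFail r t ir := by
            rw [pvAnyFail, List.any_cons, hf, Bool.false_or]
            rfl
          rw [hcons]
        · rw [if_pos h2]
          have hany : pvAnyFail r (a :: t) ir = true := by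
            rw [pvAnyFail, List.any_cons, Bool.or_eq_true]
            left
            rw [pvFail, Bool.or_eq_true]
            right
            exact decide_eq_true h2
          rw [if_pos hany]

-- A's outer loop from column ir (with invariant ntrim = ir) returns the first column
-- in [ir, stop) at which some allele fails, else stop
lemma pvLoopA_eq_find (r : List Char) (alts : List (List Char)) (stop : Nat) :
    ∀ (d ir : Nat), stop - ir = d → ir ≤ stop → (∀ j < ir, pvAnyFail r alts j = false) →
      pvLoopA r alts stop ir (ir : Int) = (Nat.find (pvG_ex r alts stop) : Int) := by
  intro d
  induction d with
  | zero =>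
      intro ir hd hle hb
      have hns : ¬ ir < stop := by omega
      rw [pvLoopA, dif_neg hns]
      have heq : Nat.find (pvG_ex r alts stop) = ir := by
        rw [Nat.find_eq_iff]
        constructor
        · have : ir = stop := by omega
          subst this
          rw [pvG, Bool.or_eq_true]
          left
          exact decide_eq_true (le_refl ir)
        · intro j hj
          rw [pvG, Bool.or_eq_true, not_or, hb j (by omega)]
          exact ⟨by simp only [decide_eq_true_eq]; omega, by simp⟩
      rw [heq]
  | succ d ihd =>
      intro ir hd hle hb
      have hlt : ir < stop := by omega
      rw [pvLoopA, dif_pos hlt, pvInnerA_eq]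
      by_cases hf : pvAnyFail r alts ir
      · rw [if_pos hf]
        show (ir : Int) = _
        have heq : Nat.find (pvG_ex r alts stop) = ir := by
          rw [Nat.find_eq_iff]
          constructor
          · rw [pvG, Bool.or_eq_true]
            right
            exact hf
          · intro j hj
            rw [pvG, Bool.or_eq_true, not_or, hb j hj]
            exact ⟨by simp only [decide_eq_true_eq]; omega, by simp⟩
        rw [heq]
      · rw [if_neg hf]
        show pvLoopA r alts stop (ir + 1) ((ir : Int) + 1) = _
        have hc : ((ir : Int) + 1) = ((ir + 1 : Nat) : Int) := by push_cast; ring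
        rw [hc]
        apply ihd (ir + 1) (by omega) (by omega)
        intro j hj
        rcases Nat.lt_succ_iff_lt_or_eq.mp hj with hj' | rfl
        · exact hb j hj'
        · simpa using hf

-- B's fold over alleles computes min n (first column where any allele fails, else stop)
lemma pvGoB_eq (r : List Char) (stop : Nat) :
    ∀ (alts : List (List Char)) (n : Nat), n ≤ stop →
      pvGoB r alts (n : Int) = min (n : Int) (Nat.find (pvG_ex r alts stop) : Int) := by
  intro alts
  induction alts with
  | nil =>
      intro n hn
      have : Nat.find (pvG_ex r ([] : List (List Char)) stop) = stop := by
        rw [Nat.find_eq_iff]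
        refine ⟨by simp [pvG], fun j hj => ?_⟩
        simp [pvG, pvAnyFail]
        omega
      simp [pvGoB, this]
      omega
  | cons a t ih =>
      intro n hn
      show pvGoB r t ((pvPrefB r a (min (n : Int) ((a.length : Int) - 1)) 0 : Nat) : Int) = _
      rw [pvPrefB_step r a (n : Int) (by omega)]
      have hmin : min (n : Int) (pvFirstFail r a : Int)
          = ((min n (pvFirstFail r a) : Nat) : Int) := by push_cast; omega
      rw [hmin, ih _ (le_trans (Nat.min_le_left _ _) hn)]
      have hsplit : ∀ k, pvG r (a :: t) stop k = (pvFail r a k || pvG r t stop k) := by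
        intro k
        simp only [pvG, pvAnyFail, List.any_cons]
        by_cases h1 : pvFail r a k <;> by_cases h2 : stop ≤ k <;> simp [h1, h2]
      have hor : ∃ k, (pvFail r a k || pvG r t stop k) = true :=
        ⟨stop, by simp [pvG]⟩
      rw [find_congr _ _ (pvG_ex r (a :: t) stop) hor hsplit]
      rw [find_min _ _ (pvFail_ex r a) (pvG_ex r t stop) hor]
      show min ((min n (pvFirstFail r a) : Nat) : Int) _ = _
      push_cast [pvFirstFail]
      omega

-- ===== VERDICT (by name: the statement is the Claim_ definition above) =====
theorem trim_all_alleles_spec : Claim_equal_trim_all_alleles := by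
  intro ref alts _
  unfold Spec_trim_all_alleles trim_all_alleles trim_all_alleles_alt
  set r := ref.toList with hr
  set malts := alts.map String.toList with hm
  by_cases h1 : r.length = 1
  · simp [h1]
  · by_cases h0 : r.length = 0
    · have hstop : r.length - 1 = 0 := by omega
      rw [if_neg (by simpa using h1), if_pos (by omega), hstop]
      rw [pvLoopA]
      simp
    · -- r.length ≥ 2
      have hL : 2 ≤ r.length := by omega
      rw [if_neg (by simpa using h1), if_neg (by omega)]
      set stop := r.length - 1 with hstop
      have hA : pvLoopA r malts stop 0 0 = (Nat.find (pvG_ex r malts stop) : Int) := by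
        have := pvLoopA_eq_find r malts stop stop 0 (by omega) (by omega) (by intro j hj; omega)
        simpa using this
      have hcast : ((r.length : Int) - 1) = ((stop : Nat) : Int) := by
        omega
      rw [hcast, hA, pvGoB_eq r stop malts stop (le_refl _)]
      have hfind : Nat.find (pvG_ex r malts stop) ≤ stop :=
        Nat.find_le (by simp [pvG])
      omega
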